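-- pv_equiv track=rewrite | github.com/a-feld/pytest-skippy | pytest_skippy/util.py | flatten_imports
-- ===== SOURCE A (Python) =====
-- from collections import deque
--
-- def flatten_imports(imported_module, import_tree):
--     """Returns a set of all modules imported by imported_module
--
--     The import tree is a :py:class:`dict` in the form
--     {module: set(imported_by)}
--
--     :param imported_module: A leaf module name
--     :type imported_module: str
--     :param import_tree: A dict in the form of {module: set(imported_by)}
--     :type import_tree: str
--
--     :returns: A set of modules that import imported_module
--     :rtype: set
--
--     Example:
--     A is imported by B
--
--     >>> flat = flatten_imports('A', {'A': {'B'}, 'B': set()})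
--     >>> sorted(list(flat))
--     ['A', 'B']
--     """
--     flat_imports = {imported_module}
--
--     # get all the modules that import "imported_module"
--     to_traverse = deque(import_tree[imported_module])
--
--     while to_traverse:
--         module = to_traverse.popleft()
--
--         # if we've already visited the node, continue
--         if module in flat_imports:
--             continue
--
--         flat_imports.add(module)
--
--         # add next traversal level
--         to_traverse.extend(import_tree[module])
--
--     return flat_imports
-- ===== SOURCE B (Python) =====
-- def flatten_imports(imported_module, import_tree):
--     """Generation-synchronized traversal: no queue at all.  Each round first
--     gathers the whole next neighbor generation of the current frontier in one
--     comprehension, then a second staged pass filters it against the visited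
--     set, which becomes the next frontier.  Deduplication happens at discovery
--     time, so a module is looked up in import_tree exactly once (same lookups,
--     hence the same KeyError behaviour, as the deque version); the returned
--     set of modules is identical."""
--     flat = {imported_module}
--     frontier = [imported_module]
--     while frontier:
--         neighbors = [n for m in frontier for n in import_tree[m]]
--         frontier = []
--         for n in neighbors:
--             if n not in flat:
--                 flat.add(n)
--                 frontier.append(n)
--     return flat
-- ===== Notes on version B (the rewrite author's own statement) =====
-- stated objective: alternative
-- what changed: Replaces the node-at-a-time deque worklist with pop-time deduplication by a queue-free generation-synchronized traversal: each round gathers the whole next neighbor generation of the frontier in one pass, then a second staged pass filters it against the visited set to form the next frontier, deduplicating at discovery time.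
-- outside the precondition, e.g. on flatten_imports('a', {'a': set(), 'b': {'c'}}): A returns {'a'}, B returns {'a'}
import Mathlib
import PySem

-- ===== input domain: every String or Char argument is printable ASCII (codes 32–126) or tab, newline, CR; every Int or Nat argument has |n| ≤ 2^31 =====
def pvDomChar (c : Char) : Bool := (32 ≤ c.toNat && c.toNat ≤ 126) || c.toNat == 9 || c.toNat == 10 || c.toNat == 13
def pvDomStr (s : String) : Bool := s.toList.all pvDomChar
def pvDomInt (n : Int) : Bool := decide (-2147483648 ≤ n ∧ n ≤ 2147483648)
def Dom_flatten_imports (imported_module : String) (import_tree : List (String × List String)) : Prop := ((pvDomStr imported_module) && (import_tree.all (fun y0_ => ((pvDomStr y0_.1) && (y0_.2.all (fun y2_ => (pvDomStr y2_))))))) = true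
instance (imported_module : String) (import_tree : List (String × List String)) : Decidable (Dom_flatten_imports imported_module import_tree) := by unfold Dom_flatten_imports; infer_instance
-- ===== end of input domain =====

-- B replaces A's node-at-a-time deque worklist (pop-time deduplication, may hold
-- duplicates) by a queue-free generation-synchronized traversal: each round gathers
-- the whole next neighbor generation of the frontier, then filters it against the
-- visited set in a second staged pass. Same return value, same lookups.

-- ===== PORT A =====
-- shared primitive: import_tree[m]; Python raises KeyError when the key is missing
-- (get? = none); total with default [] ONLY under Pre_ (every looked-up key present).
def pvLookup (import_tree : List (String × List String)) (m : String) : List String :=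
  ((PySem.Dict.mk import_tree).get? m).getD []

-- all strings occurring in the value lists (termination measure universe only)
def pvU (import_tree : List (String × List String)) : List String :=
  import_tree.flatMap (fun kv => kv.2)

lemma pvLookup_mem_U (import_tree : List (String × List String)) (m x : String)
    (hx : x ∈ pvLookup import_tree m) : x ∈ pvU import_tree := by
  unfold pvLookup at hx
  unfold pvU
  cases hget : (PySem.Dict.mk import_tree).get? m with
  | none => rw [hget] at hx; simp at hx
  | some v =>
    rw [hget] at hx
    simp only [Option.getD_some] at hx
    have hmem : (m, v) ∈ (PySem.Dict.mk import_tree).items :=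
      PySem.Dict.mem_items_of_get?_eq_some _ hget
    simp only [List.mem_flatMap]
    exact ⟨(m, v), hmem, hx⟩

lemma pvContainsEq (s : List String) (x : String) :
    PySem.Set.contains s x = decide (x ∈ s) := by
  by_cases h : x ∈ s
  · rw [decide_eq_true h]; exact (PySem.Set.contains_iff s x).mpr h
  · rw [decide_eq_false h]
    exact Bool.eq_false_iff.mpr (fun hc => h ((PySem.Set.contains_iff s x).mp hc))

lemma pvFilter_le (U s s' : List String) (h : ∀ x, x ∈ s → x ∈ s') :
    (U.filter (fun x => !PySem.Set.contains s' x)).length ≤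
      (U.filter (fun x => !PySem.Set.contains s x)).length := by
  simp only [pvContainsEq]
  induction U with
  | nil => simp
  | cons a U ih =>
    by_cases ha : a ∈ s
    · have ha' : a ∈ s' := h a ha
      simp only [List.filter_cons, decide_eq_true ha, decide_eq_true ha', Bool.not_true]
      exact ih
    · by_cases ha' : a ∈ s' <;>
        · simp only [List.filter_cons, decide_eq_false ha, ha', decide_eq_true,
            Bool.not_false]
          simp_all
          try omega

lemma pvFilter_lt (U s s' : List String) (h : ∀ x, x ∈ s → x ∈ s') (m : String)
    (hU : m ∈ U) (hm' : m ∈ s') (hm : m ∉ s) :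
    (U.filter (fun x => !PySem.Set.contains s' x)).length <
      (U.filter (fun x => !PySem.Set.contains s x)).length := by
  induction U with
  | nil => simp at hU
  | cons a U ih =>
    rcases List.mem_cons.mp hU with rfl | haU
    · have hle := pvFilter_le U s s' h
      simp only [pvContainsEq] at hle
      simp [hm, hm']
      omega
    · have hlt := ih haU
      by_cases ha : a ∈ s
      · have ha' : a ∈ s' := h a ha
        simp only [pvContainsEq, List.filter_cons, decide_eq_true ha, decide_eq_true ha',
          Bool.not_true] at *
        exact hlt
      · by_cases ha' : a ∈ s' <;>
          · simp only [pvContainsEq, List.filter_cons, decide_eq_false ha, ha',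
              decide_eq_true, Bool.not_false] at *
            simp_all
            try omega

-- the while loop of A: queue-driven, membership checked when a module is popped
def pvAloop (import_tree : List (String × List String)) (flat : PySem.Set String)
    (queue : List String) (hq : ∀ x ∈ queue, x ∈ pvU import_tree) : List String :=
  match queue with
  | [] => flat
  | m :: q =>
    if hm : PySem.Set.contains flat m then
      pvAloop import_tree flat q (fun x hx => hq x (List.mem_cons_of_mem m hx))
    else
      pvAloop import_tree (PySem.Set.add flat m) (q ++ pvLookup import_tree m)
        (fun x hx => (List.mem_append.mp hx).elim
          (fun h => hq x (List.mem_cons_of_mem m h))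
          (fun h => pvLookup_mem_U import_tree m x h))
termination_by
  (((pvU import_tree).filter (fun x => !PySem.Set.contains flat x)).length, queue.length)
decreasing_by
  · apply Prod.Lex.right; simp
  · apply Prod.Lex.left
    have hmU : m ∈ pvU import_tree := hq m List.mem_cons_self
    have hmflat : m ∉ flat := fun hmem => hm ((PySem.Set.contains_iff flat m).mpr hmem)
    exact pvFilter_lt _ flat (PySem.Set.add flat m)
      (fun x hx => (PySem.Set.mem_add flat m x).mpr (Or.inl hx)) m hmU
      ((PySem.Set.mem_add flat m m).mpr (Or.inr rfl)) hmflat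

def flatten_imports (imported_module : String) (import_tree : List (String × List String)) : List String :=
  pvAloop import_tree (PySem.Set.ofList [imported_module]) (pvLookup import_tree imported_module)
    (fun x hx => pvLookup_mem_U import_tree imported_module x hx)

-- ===== PORT B =====
-- the discovery step of B's filter pass: an unseen neighbor enters flat and the
-- next frontier
def pvDisc (fs : PySem.Set String × List String) (n : String) :
    PySem.Set String × List String :=
  if PySem.Set.contains fs.1 n then fs else (PySem.Set.add fs.1 n, fs.2 ++ [n])

-- the genuinely new elements of a list w.r.t. flat, first occurrences in order
-- (characterizes B's filter pass; needed below for B's termination argument)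
def pvFreshOf (flat : PySem.Set String) : List String → List String
  | [] => []
  | n :: ns => if n ∈ flat then pvFreshOf flat ns else n :: pvFreshOf (flat ++ [n]) ns

lemma pvUpdate_eq_fresh (flat : PySem.Set String) (ns : List String) :
    PySem.Set.update flat ns = flat ++ pvFreshOf flat ns := by
  induction ns generalizing flat with
  | nil => simp [pvFreshOf, PySem.Set.update_nil]
  | cons n ns ih =>
    rw [PySem.Set.update_cons, pvFreshOf]
    by_cases hn : n ∈ flat
    · rw [if_pos hn, PySem.Set.add_of_mem hn]; exact ih flat
    · rw [if_neg hn, PySem.Set.add_of_not_mem hn, ih (flat ++ [n]), List.append_assoc]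
      rfl

lemma pvMem_fresh (flat : PySem.Set String) (ns : List String) (x : String)
    (hx : x ∈ pvFreshOf flat ns) : x ∈ ns ∧ x ∉ flat := by
  induction ns generalizing flat with
  | nil => simp [pvFreshOf] at hx
  | cons n ns ih =>
    rw [pvFreshOf] at hx
    by_cases hn : n ∈ flat
    · rw [if_pos hn] at hx
      obtain ⟨h1, h2⟩ := ih flat hx
      exact ⟨List.mem_cons_of_mem n h1, h2⟩
    · rw [if_neg hn] at hx
      rcases List.mem_cons.mp hx with rfl | hx'
      · exact ⟨List.mem_cons_self, hn⟩
      · obtain ⟨h1, h2⟩ := ih (flat ++ [n]) hx'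
        exact ⟨List.mem_cons_of_mem n h1, fun h => h2 (List.mem_append_left _ h)⟩

-- B's filter pass over a gathered generation = Set.update plus the fresh elements
lemma pvDiscFold (ns : List String) (flat : PySem.Set String) (acc : List String) :
    ns.foldl pvDisc (flat, acc) = (PySem.Set.update flat ns, acc ++ pvFreshOf flat ns) := by
  induction ns generalizing flat acc with
  | nil => simp [PySem.Set.update_nil, pvFreshOf]
  | cons n ns ih =>
    rw [List.foldl_cons, PySem.Set.update_cons, pvFreshOf]
    by_cases hn : n ∈ flat
    · have hc : PySem.Set.contains flat n = true := (PySem.Set.contains_iff flat n).mpr hn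
      rw [if_pos hn, PySem.Set.add_of_mem hn]
      show ns.foldl pvDisc (pvDisc (flat, acc) n) = _
      rw [pvDisc, if_pos hc]
      exact ih flat acc
    · have hc : ¬ PySem.Set.contains flat n = true :=
        fun h => hn ((PySem.Set.contains_iff flat n).mp h)
      rw [if_neg hn, PySem.Set.add_of_not_mem hn]
      show ns.foldl pvDisc (pvDisc (flat, acc) n) = _
      rw [pvDisc, if_neg hc]
      show ns.foldl pvDisc (PySem.Set.add flat n, acc ++ [n]) = _
      rw [PySem.Set.add_of_not_mem hn, ih (flat ++ [n]) (acc ++ [n]), List.append_assoc]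
      rfl

-- B's gather pass: the whole neighbor generation of a frontier, in one comprehension
def pvGather (import_tree : List (String × List String)) (frontier : List String) : List String :=
  frontier.flatMap (pvLookup import_tree)

lemma pvGather_mem_U (import_tree : List (String × List String)) (frontier : List String)
    (x : String) (hx : x ∈ pvGather import_tree frontier) : x ∈ pvU import_tree := by
  obtain ⟨m, _, hxm⟩ := List.mem_flatMap.mp hx
  exact pvLookup_mem_U import_tree m x hxm

-- the while loop of B: per generation, gather all neighbors, then filter them
-- against the visited set to form the next frontier
def pvBloop (import_tree : List (String × List String)) (flat : PySem.Set String)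
    (frontier : List String) : List String :=
  if h : frontier = [] then flat
  else
    pvBloop import_tree
      ((pvGather import_tree frontier).foldl pvDisc (flat, [])).1
      ((pvGather import_tree frontier).foldl pvDisc (flat, [])).2
termination_by
  (((pvU import_tree).filter (fun x => !PySem.Set.contains flat x)).length, frontier.length)
decreasing_by
  rw [pvDiscFold]
  cases hf : pvFreshOf flat (pvGather import_tree frontier) with
  | nil =>
    have hflat : PySem.Set.update flat (pvGather import_tree frontier) = flat := by
      rw [pvUpdate_eq_fresh, hf, List.append_nil]
    rw [hflat]
    apply Prod.Lex.right
    simp only [List.nil_append, List.length_nil]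
    exact List.length_pos_of_ne_nil h
  | cons m t =>
    apply Prod.Lex.left
    have hm : m ∈ pvFreshOf flat (pvGather import_tree frontier) := by
      rw [hf]; exact List.mem_cons_self
    obtain ⟨hmns, hmflat⟩ := pvMem_fresh flat _ m hm
    refine pvFilter_lt _ flat _ ?_ m (pvGather_mem_U import_tree frontier m hmns) ?_ hmflat
    · intro x hx
      rw [pvUpdate_eq_fresh]; exact List.mem_append_left _ hx
    · rw [pvUpdate_eq_fresh]
      exact List.mem_append_right _ hm

def flatten_imports_alt (imported_module : String) (import_tree : List (String × List String)) : List String :=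
  pvBloop import_tree (PySem.Set.ofList [imported_module]) [imported_module]

-- ===== PRECONDITION & SPEC =====
-- Pre_ excludes (a) inputs whose reachable part mentions a module with no import_tree
-- entry — there Python raises KeyError — and, more strongly than needed, inputs where
-- only an UNREACHABLE value list mentions a missing module (A still returns there, but
-- reachability is not a closed-form condition; see claim cites); and (b) association
-- lists with duplicate keys, which no Python dict input can produce.
def Pre_flatten_imports (imported_module : String) (import_tree : List (String × List String)) : Prop :=
  (import_tree.map Prod.fst).Nodup ∧
  imported_module ∈ import_tree.map Prod.fst ∧
  ∀ p ∈ import_tree, ∀ x ∈ p.2, x ∈ import_tree.map Prod.fst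
instance (imported_module : String) (import_tree : List (String × List String)) : Decidable (Pre_flatten_imports imported_module import_tree) := by unfold Pre_flatten_imports; infer_instance

def pvWitness_flatten_imports : String × (List (String × List String)) :=
  ("A", [("A", ["B"]), ("B", [])])

def Spec_flatten_imports (imported_module : String) (import_tree : List (String × List String)) (out : List String) : Prop := out = flatten_imports_alt imported_module import_tree
instance (imported_module : String) (import_tree : List (String × List String)) (out : List String) : Decidable (Spec_flatten_imports imported_module import_tree out) := by unfold Spec_flatten_imports; infer_instance

-- ===== CLAIM (what is proved, stated in full; the proofs are below) =====
def Claim_equal_flatten_imports : Prop := ∀ (imported_module : String) (import_tree : List (String × List String)), Dom_flatten_imports imported_module import_tree → Pre_flatten_imports imported_module import_tree → Spec_flatten_imports imported_module import_tree (flatten_imports imported_module import_tree)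

-- ===== LEMMAS AND PROOFS =====

-- proof arguments of pvAloop are irrelevant: congruence in the data arguments
lemma pvAloop_congr (import_tree : List (String × List String))
    {flat flat' : PySem.Set String} {q q' : List String}
    (hflat : flat = flat') (hq : q = q')
    (h : ∀ x ∈ q, x ∈ pvU import_tree) (h' : ∀ x ∈ q', x ∈ pvU import_tree) :
    pvAloop import_tree flat q h = pvAloop import_tree flat' q' h' := by
  subst hflat; subst hq; rfl

lemma pvAloop_nil (import_tree : List (String × List String)) (flat : PySem.Set String)
    (h : ∀ x ∈ ([] : List String), x ∈ pvU import_tree) :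
    pvAloop import_tree flat [] h = flat := by
  rw [pvAloop]

-- the neighbor generation A appends while popping one frontier: the lookups of the
-- genuinely new frontier elements, in order (= B's gather pass over the fresh part)
def pvOut (import_tree : List (String × List String)) (flat : PySem.Set String)
    (l : List String) : List String :=
  pvGather import_tree (pvFreshOf flat l)

lemma pvOut_sub (import_tree : List (String × List String)) (flat : PySem.Set String)
    (l : List String) : ∀ x ∈ pvOut import_tree flat l, x ∈ pvU import_tree :=
  fun x hx => pvGather_mem_U import_tree (pvFreshOf flat l) x hx

lemma pvOut_cons_mem (import_tree : List (String × List String)) (flat : PySem.Set String)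
    (m : String) (l : List String) (hm : m ∈ flat) :
    pvOut import_tree flat (m :: l) = pvOut import_tree flat l := by
  unfold pvOut; rw [pvFreshOf, if_pos hm]

lemma pvOut_cons_not_mem (import_tree : List (String × List String)) (flat : PySem.Set String)
    (m : String) (l : List String) (hm : m ∉ flat) :
    pvOut import_tree flat (m :: l) =
      pvLookup import_tree m ++ pvOut import_tree (flat ++ [m]) l := by
  unfold pvOut pvGather; rw [pvFreshOf, if_neg hm, List.flatMap_cons]

-- A's loop, run until the current generation l is fully consumed: it visits exactly
-- the fresh elements of l and queues their lookups after the rest r of the queue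
lemma pvAdecomp (import_tree : List (String × List String)) (l : List String) :
    ∀ (flat : PySem.Set String) (r : List String)
      (hq : ∀ x ∈ l ++ r, x ∈ pvU import_tree)
      (hr : ∀ x ∈ r ++ pvOut import_tree flat l, x ∈ pvU import_tree),
      pvAloop import_tree flat (l ++ r) hq =
        pvAloop import_tree (PySem.Set.update flat l) (r ++ pvOut import_tree flat l) hr := by
  induction l with
  | nil =>
    intro flat r hq hr
    exact pvAloop_congr import_tree (by rw [PySem.Set.update_nil])
      (by unfold pvOut pvGather pvFreshOf; simp) hq hr
  | cons m l ih =>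
    intro flat r hq hr
    show pvAloop import_tree flat (m :: (l ++ r)) hq = _
    rw [pvAloop]
    by_cases hm : PySem.Set.contains flat m
    · rw [dif_pos hm]
      have hmem : m ∈ flat := (PySem.Set.contains_iff flat m).mp hm
      have hr2 : ∀ x ∈ r ++ pvOut import_tree flat l, x ∈ pvU import_tree := by
        rw [← pvOut_cons_mem import_tree flat m l hmem]; exact hr
      refine (ih flat r (fun x hx => hq x (List.mem_cons_of_mem m hx)) hr2).trans ?_
      exact pvAloop_congr import_tree
        (by rw [PySem.Set.update_cons, PySem.Set.add_of_mem hmem])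
        (by rw [pvOut_cons_mem import_tree flat m l hmem]) hr2 hr
    · rw [dif_neg hm]
      have hmem : m ∉ flat := fun h => hm ((PySem.Set.contains_iff flat m).mpr h)
      have hadd : PySem.Set.add flat m = flat ++ [m] := PySem.Set.add_of_not_mem hmem
      have hq2 : ∀ x ∈ l ++ (r ++ pvLookup import_tree m), x ∈ pvU import_tree := by
        intro x hx
        rcases List.mem_append.mp hx with h1 | h2
        · exact hq x (List.mem_cons_of_mem m (List.mem_append_left _ h1))
        · rcases List.mem_append.mp h2 with h3 | h4
          · exact hq x (List.mem_cons_of_mem m (List.mem_append_right _ h3))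
          · exact pvLookup_mem_U import_tree m x h4
      have hr2 : ∀ x ∈ (r ++ pvLookup import_tree m) ++
          pvOut import_tree (PySem.Set.add flat m) l, x ∈ pvU import_tree := by
        intro x hx
        rcases List.mem_append.mp hx with h1 | h2
        · rcases List.mem_append.mp h1 with h3 | h4
          · exact hr x (List.mem_append_left _ h3)
          · exact pvLookup_mem_U import_tree m x h4
        · exact pvOut_sub import_tree _ l x h2
      refine (pvAloop_congr import_tree rfl (List.append_assoc l r _) _ hq2).trans ?_
      refine (ih (PySem.Set.add flat m) (r ++ pvLookup import_tree m) hq2 hr2).trans ?_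
      exact pvAloop_congr import_tree
        (by rw [PySem.Set.update_cons])
        (by rw [hadd, pvOut_cons_not_mem import_tree flat m l hmem, List.append_assoc])
        hr2 hr

-- main simulation: A consuming generation l node-by-node equals B's generation loop
-- started after the staged discovery of l
lemma pvMain (import_tree : List (String × List String)) :
    ∀ (n : Nat) (flat : PySem.Set String) (l : List String)
      (hl : ∀ x ∈ l, x ∈ pvU import_tree)
      (hn : ((pvU import_tree).filter (fun x => !PySem.Set.contains flat x)).length ≤ n),
      pvAloop import_tree flat l hl =
        pvBloop import_tree (PySem.Set.update flat l) (pvFreshOf flat l) := by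
  have decomp0 : ∀ (flat : PySem.Set String) (l : List String)
      (hl : ∀ x ∈ l, x ∈ pvU import_tree),
      pvAloop import_tree flat l hl =
        pvAloop import_tree (PySem.Set.update flat l) (pvOut import_tree flat l)
          (pvOut_sub import_tree flat l) := by
    intro flat l hl
    have hq : ∀ x ∈ l ++ ([] : List String), x ∈ pvU import_tree := by
      intro x hx; rw [List.append_nil] at hx; exact hl x hx
    have hr : ∀ x ∈ ([] : List String) ++ pvOut import_tree flat l, x ∈ pvU import_tree := by
      intro x hx; exact pvOut_sub import_tree flat l x hx
    refine (pvAloop_congr import_tree rfl (List.append_nil l).symm hl hq).trans ?_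
    refine (pvAdecomp import_tree l flat [] hq hr).trans ?_
    exact pvAloop_congr import_tree rfl (List.nil_append _) hr _
  intro n
  induction n with
  | zero =>
    intro flat l hl hn
    cases hf : pvFreshOf flat l with
    | nil =>
      have hupd : PySem.Set.update flat l = flat := by
        rw [pvUpdate_eq_fresh, hf, List.append_nil]
      have hout : pvOut import_tree flat l = [] := by unfold pvOut; rw [hf]; rfl
      rw [decomp0 flat l hl]
      rw [pvBloop]
      simp only [dite_true]
      refine (pvAloop_congr import_tree hupd hout _ (by simp)).trans ?_
      rw [pvAloop_nil, hupd]
    | cons m t =>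
      exfalso
      have hm : m ∈ pvFreshOf flat l := by rw [hf]; exact List.mem_cons_self
      obtain ⟨hml, hmflat⟩ := pvMem_fresh flat l m hm
      have hmU : m ∈ pvU import_tree := hl m hml
      have hmem : m ∈ (pvU import_tree).filter (fun x => !PySem.Set.contains flat x) := by
        rw [List.mem_filter]
        refine ⟨hmU, ?_⟩
        rw [pvContainsEq, decide_eq_false hmflat]
        rfl
      have := List.length_pos_of_mem hmem
      omega
  | succ n ihn =>
    intro flat l hl hn
    cases hf : pvFreshOf flat l with
    | nil =>
      have hupd : PySem.Set.update flat l = flat := by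
        rw [pvUpdate_eq_fresh, hf, List.append_nil]
      have hout : pvOut import_tree flat l = [] := by unfold pvOut; rw [hf]; rfl
      rw [decomp0 flat l hl]
      rw [pvBloop]
      simp only [dite_true]
      refine (pvAloop_congr import_tree hupd hout _ (by simp)).trans ?_
      rw [pvAloop_nil, hupd]
    | cons m t =>
      have hfl : pvFreshOf flat l ≠ [] := by rw [hf]; simp
      have hflat2 : ((pvU import_tree).filter
          (fun x => !PySem.Set.contains (PySem.Set.update flat l) x)).length ≤ n := by
        have hm : m ∈ pvFreshOf flat l := by rw [hf]; exact List.mem_cons_self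
        obtain ⟨hml, hmflat⟩ := pvMem_fresh flat l m hm
        have hlt := pvFilter_lt (pvU import_tree) flat (PySem.Set.update flat l)
          (fun x hx => by rw [pvUpdate_eq_fresh]; exact List.mem_append_left _ hx) m
          (hl m hml)
          (by rw [pvUpdate_eq_fresh]; exact List.mem_append_right _ hm) hmflat
        omega
      rw [← hf]
      rw [decomp0 flat l hl]
      rw [ihn (PySem.Set.update flat l) (pvOut import_tree flat l)
        (pvOut_sub import_tree flat l) hflat2]
      -- B side: unfold one generation of pvBloop
      conv_rhs => rw [pvBloop]
      rw [dif_neg hfl]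
      rw [pvDiscFold (pvGather import_tree (pvFreshOf flat l)) (PySem.Set.update flat l) []]
      simp only [List.nil_append]
      rfl

-- ===== VERDICT (by name: the statement is the Claim_ definition above) =====
theorem flatten_imports_spec : Claim_equal_flatten_imports := by
  intro imported_module import_tree _ _
  show _ = flatten_imports_alt imported_module import_tree
  unfold flatten_imports flatten_imports_alt
  have hof : PySem.Set.ofList [imported_module] = [imported_module] :=
    PySem.Set.ofList_eq_self_of_nodup _ (by simp)
  rw [hof]
  -- unfold the first generation of B: frontier [imported_module]
  rw [pvBloop]
  rw [dif_neg (by simp : ¬ ([imported_module] : List String) = [])]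
  have hg : pvGather import_tree [imported_module] = pvLookup import_tree imported_module := by
    unfold pvGather
    rw [List.flatMap_cons, List.flatMap_nil, List.append_nil]
  rw [hg, pvDiscFold]
  simp only [List.nil_append]
  exact pvMain import_tree
    (((pvU import_tree).filter (fun x => !PySem.Set.contains [imported_module] x)).length)
    [imported_module] (pvLookup import_tree imported_module)
    (fun x hx => pvLookup_mem_U import_tree imported_module x hx) (le_refl _)
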